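-- pv_equiv track=rewrite | github.com/shinniehi/3mien | handlers/xien.py | format_xien_result
-- ===== SOURCE A (Python) =====
-- def format_xien_result(combos):
--     """
--     Định dạng kết quả ghép xiên:
--     - Các số trong tổ hợp ngăn cách bằng &
--     - Các tổ hợp ngăn cách bằng dấu phẩy ,
--     - Sau mỗi 20 tổ hợp thì xuống dòng
--     """
--     if not combos:
--         return "❗ Không đủ số để ghép xiên."
--     # Định dạng từng tổ hợp: 22&33&44,...
--     formatted = ["&".join(combo) for combo in combos]
--     # Ngắt dòng sau mỗi 20 tổ hợp
--     lines = []
--     for i in range(0, len(formatted), 20):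
--         chunk = formatted[i:i+20]
--         lines.append(", ".join(chunk))
--     result = "*Kết quả tổ hợp xiên:*\n" + "\n".join(lines)
--     return result
-- ===== SOURCE B (Python) =====
-- def format_xien_result(combos):
--     if not combos:
--         return "❗ Không đủ số để ghép xiên."
--     # single pass: keep a buffer of the current line, flush when it holds 20 combos
--     lines = []
--     buf = []
--     for combo in combos:
--         if len(buf) == 20:
--             lines.append(", ".join(buf))
--             buf = []
--         buf.append("&".join(combo))
--     lines.append(", ".join(buf))
--     return "*Kết quả tổ hợp xiên:*\n" + "\n".join(lines)
-- ===== Notes on version B (the rewrite author's own statement) =====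
-- stated objective: alternative
-- what changed: Replaced A's two-pass build-all-then-chunk-by-slicing structure (format every combo, then slice the list at indices 0,20,40,... via range/step) with a single fused pass that formats each combo on the fly into a current-line buffer and flushes the buffer into a line whenever it reaches 20 entries.
import Mathlib
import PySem

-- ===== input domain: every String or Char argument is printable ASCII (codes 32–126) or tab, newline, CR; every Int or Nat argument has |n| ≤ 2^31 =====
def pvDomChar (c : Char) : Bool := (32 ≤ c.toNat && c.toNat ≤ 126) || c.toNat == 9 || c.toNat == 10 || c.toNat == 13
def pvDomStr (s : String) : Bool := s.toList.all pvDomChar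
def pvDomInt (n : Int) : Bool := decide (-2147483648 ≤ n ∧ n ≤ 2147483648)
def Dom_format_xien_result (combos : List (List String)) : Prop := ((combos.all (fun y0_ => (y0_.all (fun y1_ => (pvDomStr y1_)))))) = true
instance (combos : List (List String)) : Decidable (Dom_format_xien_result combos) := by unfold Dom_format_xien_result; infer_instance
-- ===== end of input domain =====

-- B fuses A's two passes (format all combos, then chunk by slicing at 0,20,40,…) into one
-- buffered pass that flushes a line every 20 combos; return values proved equal on all inputs.

-- ===== PORT A =====
-- loop body of A's `for i in range(0, len(formatted), 20)` loop
def pvStepA (formatted : List String) (lines : List String) (i : Int) : List String :=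
  lines ++ [PySem.Str.join ", " (PySem.List.slice formatted (some i) (some (i + 20)))]

def format_xien_result (combos : List (List String)) : String :=
  if combos = [] then "❗ Không đủ số để ghép xiên."
  else
    let formatted := combos.map (fun combo => PySem.Str.join "&" combo)
    let lines := (PySem.List.pyRange 0 (formatted.length : Int) 20).foldl (pvStepA formatted) []
    "*Kết quả tổ hợp xiên:*\n" ++ PySem.Str.join "\n" lines

-- ===== PORT B =====
-- loop body of B's single `for combo in combos` loop; state = (lines, buf)
def pvStepB (st : List String × List String) (combo : List String) : List String × List String :=
  let st := if st.2.length = 20 then (st.1 ++ [PySem.Str.join ", " st.2], ([] : List String)) else st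
  (st.1, st.2 ++ [PySem.Str.join "&" combo])

def format_xien_result_alt (combos : List (List String)) : String :=
  if combos = [] then "❗ Không đủ số để ghép xiên."
  else
    let st := combos.foldl pvStepB ([], [])
    let lines := st.1 ++ [PySem.Str.join ", " st.2]
    "*Kết quả tổ hợp xiên:*\n" ++ PySem.Str.join "\n" lines

-- ===== PRECONDITION & SPEC =====
def Spec_format_xien_result (combos : List (List String)) (out : String) : Prop := out = format_xien_result_alt combos
instance (combos : List (List String)) (out : String) : Decidable (Spec_format_xien_result combos out) := by unfold Spec_format_xien_result; infer_instance

-- ===== CLAIM (what is proved, stated in full; the proofs are below) =====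
def Claim_equal_format_xien_result : Prop := ∀ (combos : List (List String)), Dom_format_xien_result combos → Spec_format_xien_result combos (format_xien_result combos)

-- ===== LEMMAS AND PROOFS =====

-- canonical chunking: the list of ", "-joined blocks of 20
def pvChunk20 (fs : List String) : List String :=
  if fs = [] then [] else PySem.Str.join ", " (fs.take 20) :: pvChunk20 (fs.drop 20)
termination_by fs.length
decreasing_by
  rename_i h
  have hpos : 0 < fs.length := List.length_pos_iff.mpr h
  simp only [List.length_drop]
  omega

lemma pyRange20_nil (a b : Int) (h : b ≤ a) : PySem.List.pyRange a b 20 = [] := by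
  rw [PySem.List.pyRange_of_pos _ _ (by norm_num)]
  rw [if_neg (by omega)]
  simp

lemma pyRange20_cons (a b : Int) (h : a < b) :
    PySem.List.pyRange a b 20 = a :: PySem.List.pyRange (a + 20) b 20 := by
  rw [PySem.List.pyRange_of_pos _ _ (by norm_num), PySem.List.pyRange_of_pos _ _ (by norm_num)]
  rw [if_pos h]
  by_cases h2 : a + 20 < b
  · rw [if_pos h2]
    have hc : ((b - a + 20 - 1) / 20).toNat = ((b - (a + 20) + 20 - 1) / 20).toNat + 1 := by omega
    rw [hc, List.range_succ_eq_map, List.map_cons, List.map_map]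
    congr 1
    · simp
    · apply List.map_congr_left
      intro k _
      simp only [Function.comp_apply]
      push_cast
      ring
  · rw [if_neg h2]
    have hc : ((b - a + 20 - 1) / 20).toNat = 1 := by omega
    simp [hc, List.range_one]

lemma foldA_eq (fs : List String) (j : Nat) (acc : List String) :
    (PySem.List.pyRange (j : Int) (fs.length : Int) 20).foldl (pvStepA fs) acc
      = acc ++ pvChunk20 (fs.drop j) := by
  by_cases h : j < fs.length
  · rw [pyRange20_cons _ _ (by exact_mod_cast h)]
    rw [List.foldl_cons]
    have hcast : (j : Int) + 20 = ((j + 20 : Nat) : Int) := by push_cast; ring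
    rw [hcast, foldA_eq fs (j + 20) _]
    have hslice : PySem.List.slice fs (some (j : Int)) (some ((j : Int) + 20))
        = (fs.drop j).take 20 := by
      have : ((j : Int) + 20) = ((j : Int) + ((20 : Nat) : Int)) := by norm_num
      rw [this, PySem.List.slice_natCast_add]
    have hne : fs.drop j ≠ [] := List.length_pos_iff.mp (by rw [List.length_drop]; omega)
    conv_rhs => rw [pvChunk20, if_neg hne]
    simp [pvStepA, hslice, List.drop_drop]
  · have hb : (fs.length : Int) ≤ (j : Int) := by exact_mod_cast Nat.le_of_not_lt h
    rw [pyRange20_nil _ _ hb, List.drop_eq_nil_of_le (Nat.le_of_not_lt h), pvChunk20]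
    simp
termination_by fs.length - j
decreasing_by omega

lemma foldB_eq (cs : List (List String)) (lines buf : List String)
    (h1 : buf ≠ []) (h2 : buf.length ≤ 20) :
    (cs.foldl pvStepB (lines, buf)).1 ++ [PySem.Str.join ", " (cs.foldl pvStepB (lines, buf)).2]
      = lines ++ pvChunk20 (buf ++ cs.map (fun c => PySem.Str.join "&" c)) := by
  induction cs generalizing lines buf with
  | nil =>
    simp only [List.foldl_nil, List.map_nil, List.append_nil]
    rw [pvChunk20, if_neg h1, List.take_of_length_le h2,
      List.drop_eq_nil_of_le h2, pvChunk20]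
    simp
  | cons c cs ih =>
    rw [List.foldl_cons]
    by_cases h20 : buf.length = 20
    · have hstep : pvStepB (lines, buf) c
          = (lines ++ [PySem.Str.join ", " buf], [PySem.Str.join "&" c]) := by
        simp [pvStepB, h20]
      rw [hstep, ih _ _ (by simp) (by simp)]
      have : pvChunk20 (buf ++ (c :: cs).map (fun c => PySem.Str.join "&" c))
          = PySem.Str.join ", " buf
            :: pvChunk20 ([PySem.Str.join "&" c] ++ cs.map (fun c => PySem.Str.join "&" c)) := by
        rw [pvChunk20, if_neg (by simp [h1])]
        rw [show (20 : Nat) = buf.length from h20.symm]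
        rw [List.take_left, List.drop_left]
        simp
      rw [this]
      simp
    · have hstep : pvStepB (lines, buf) c = (lines, buf ++ [PySem.Str.join "&" c]) := by
        simp [pvStepB, h20]
      rw [hstep, ih _ _ (by simp) (by simp; omega)]
      simp

-- ===== VERDICT (by name: the statement is the Claim_ definition above) =====
theorem format_xien_result_spec : Claim_equal_format_xien_result := by
  intro combos _
  unfold Spec_format_xien_result
  cases combos with
  | nil => rfl
  | cons c cs =>
    have hne : (c :: cs) ≠ ([] : List (List String)) := by simp
    simp only [format_xien_result, format_xien_result_alt, if_neg hne]
    -- A's lines = pvChunk20 of the formatted list = B's lines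
    rw [show (0 : Int) = ((0 : Nat) : Int) by norm_num, foldA_eq]
    have hstep0 : pvStepB ([], []) c = ([], [PySem.Str.join "&" c]) := by
      simp [pvStepB]
    rw [List.foldl_cons, hstep0,
      foldB_eq cs [] [PySem.Str.join "&" c] (by simp) (by simp)]
    simp
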